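-- pv_equiv track=rewrite | github.com/ivlab/ABREngine-UnityPackage | ABRServer~/api/views.py | clean_state_path
-- ===== SOURCE A (Python) =====
-- def clean_state_path(method_path, request_path):
--     # Parse the URL into its sub-components (we know it'll be /state/* that gets us here)
--     # For paths with keys that contain slashes (/), need to quote them
--     quote_parts = request_path.split('"')
--
--     # Build the path list
--     item_path_parts = []
--     for i in range(len(quote_parts)):
--         if len(quote_parts[i]) <= 0:
--             continue
--
--         # At the beginning, get rid of the extra state parts
--         q = quote_parts[i].replace(method_path, '')
--
--         if i % 2 == 0:
--             item_path_parts.extend([x for x in q.split('/') if len(x) > 0])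
--         else:
--             if len(q) > 0:
--                 item_path_parts.append(q)
--     return item_path_parts
-- ===== SOURCE B (Python) =====
-- def clean_state_path(method_path, request_path):
--     # One-pass character scan: toggle an in-quote flag at each '"' instead of
--     # splitting first and replaying index parity.
--     item_path_parts = []
--
--     def finish(seg, in_quote):
--         if not seg:
--             return
--         q = ''.join(seg).replace(method_path, '')
--         if in_quote:
--             if q:
--                 item_path_parts.append(q)
--         else:
--             item_path_parts.extend(x for x in q.split('/') if x)
--
--     in_quote = False
--     seg = []
--     for ch in request_path:
--         if ch == '"':
--             finish(seg, in_quote)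
--             seg = []
--             in_quote = not in_quote
--         else:
--             seg.append(ch)
--     finish(seg, in_quote)
--     return item_path_parts
-- ===== Notes on version B (the rewrite author's own statement) =====
-- stated objective: alternative
-- what changed: Replaces split-on-quote followed by an index-parity loop with a single character-by-character scan that maintains an in-quote flag and a current-segment buffer, finishing a segment at each quote and at end of string.
import Mathlib
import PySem

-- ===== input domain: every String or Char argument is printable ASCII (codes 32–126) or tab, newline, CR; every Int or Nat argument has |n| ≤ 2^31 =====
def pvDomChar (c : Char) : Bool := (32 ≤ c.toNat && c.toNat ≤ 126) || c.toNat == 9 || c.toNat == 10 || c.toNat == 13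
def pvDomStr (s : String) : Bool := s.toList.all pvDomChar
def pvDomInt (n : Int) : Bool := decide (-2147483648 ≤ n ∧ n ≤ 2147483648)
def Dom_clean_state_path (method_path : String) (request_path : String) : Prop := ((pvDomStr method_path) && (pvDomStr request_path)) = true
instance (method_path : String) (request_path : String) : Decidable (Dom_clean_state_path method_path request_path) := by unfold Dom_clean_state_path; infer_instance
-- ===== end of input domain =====

-- B is an alternative decomposition (one char-scan with an in-quote flag, instead of split-then-index-parity); same cost, proved equal on all inputs.

-- ===== PORT A =====
-- split on '"', then fold over the enumerated parts branching on index parity (strings handled on the List Char side, per PySem convention)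
def clean_state_path (method_path : String) (request_path : String) : List String :=
  let quote_parts := PySem.Chars.splitOn request_path.toList ['"']
  (PySem.List.enumerate quote_parts 0).foldl (fun acc p =>
    if PySem.Chars.len p.2 ≤ 0 then acc
    else
      let q := PySem.Chars.replace p.2 method_path.toList []
      if PySem.Int.mod p.1 2 = 0 then
        acc ++ ((PySem.Chars.splitOn q ['/']).filter (fun x => decide (0 < PySem.Chars.len x))).map String.ofList
      else
        if 0 < PySem.Chars.len q then acc ++ [String.ofList q] else acc) []

-- ===== PORT B =====
-- finish one raw segment: skip if empty, strip method_path occurrences, then append (in quotes) or split on '/' (outside quotes)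
def pvFinishB (method_path : List Char) (seg : List Char) (in_quote : Bool) (acc : List String) : List String :=
  if seg.isEmpty then acc
  else
    let q := PySem.Chars.replace seg method_path []
    if in_quote then (if q.isEmpty then acc else acc ++ [String.ofList q])
    else acc ++ ((PySem.Chars.splitOn q ['/']).filter (fun x => !x.isEmpty)).map String.ofList

-- character scan: toggle in_quote at each '"', buffering the current segment
def pvGoB (method_path : List Char) : List Char → Bool → List Char → List String → List String
  | [], in_quote, seg, acc => pvFinishB method_path seg in_quote acc
  | c :: rest, in_quote, seg, acc =>
    if c = '"' then pvGoB method_path rest (!in_quote) [] (pvFinishB method_path seg in_quote acc)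
    else pvGoB method_path rest in_quote (seg ++ [c]) acc

def clean_state_path_alt (method_path : String) (request_path : String) : List String :=
  pvGoB method_path.toList request_path.toList false [] []

-- ===== PRECONDITION & SPEC =====
def Spec_clean_state_path (method_path : String) (request_path : String) (out : List String) : Prop := out = clean_state_path_alt method_path request_path
instance (method_path : String) (request_path : String) (out : List String) : Decidable (Spec_clean_state_path method_path request_path out) := by unfold Spec_clean_state_path; infer_instance

-- ===== CLAIM (what is proved, stated in full; the proofs are below) =====
def Claim_equal_clean_state_path : Prop := ∀ (method_path : String) (request_path : String), Dom_clean_state_path method_path request_path → Spec_clean_state_path method_path request_path (clean_state_path method_path request_path)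

-- ===== LEMMAS AND PROOFS =====

-- reference split on '"' (proof-only helper)
def pvSplitQ : List Char → List (List Char)
  | [] => [[]]
  | c :: rest =>
    if c = '"' then [] :: pvSplitQ rest
    else
      match pvSplitQ rest with
      | s :: ss => (c :: s) :: ss
      | [] => [[c]]

def pvMapFirst (f : List Char → List Char) : List (List Char) → List (List Char)
  | [] => []
  | s :: ss => f s :: ss

lemma pvSplitQ_ne_nil (l : List Char) : pvSplitQ l ≠ [] := by
  cases l with
  | nil => simp [pvSplitQ]
  | cons c rest =>
    simp only [pvSplitQ]
    split_ifs
    · simp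
    · cases h : pvSplitQ rest <;> simp

lemma pvMapFirst_id (xs : List (List Char)) : pvMapFirst (fun s => [] ++ s) xs = xs := by
  cases xs <;> simp [pvMapFirst]

lemma pv_go_eq (fuel : Nat) (l cur : List Char) (acc : List (List Char)) (h : l.length < fuel) :
    PySem.Chars.splitOn.go ['"'] fuel l cur acc
      = acc.reverse ++ pvMapFirst (fun s => cur.reverse ++ s) (pvSplitQ l) := by
  induction fuel generalizing l cur acc with
  | zero => omega
  | succ fuel ih =>
    cases l with
    | nil => simp [PySem.Chars.splitOn.go, pvSplitQ, pvMapFirst]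
    | cons c rest =>
      by_cases hc : c = '"'
      · subst hc
        have hpre : List.isPrefixOf ['"'] ('"' :: rest) = true := by
          simp [List.isPrefixOf]
        rw [PySem.Chars.splitOn.go, if_pos hpre]
        simp only [List.length_cons, List.length_nil, List.drop_succ_cons, List.drop_zero]
        rw [ih rest [] (cur.reverse :: acc) (by simpa using Nat.lt_of_succ_lt_succ (by simpa using h))]
        cases hs : pvSplitQ rest with
        | nil => exact absurd hs (pvSplitQ_ne_nil rest)
        | cons s ss => simp [pvSplitQ, pvMapFirst, hs]
      · have hpre : List.isPrefixOf ['"'] (c :: rest) = false := by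
          simp only [List.isPrefixOf, Bool.and_true, beq_eq_false_iff_ne]
          exact fun h => hc h.symm
        rw [PySem.Chars.splitOn.go, if_neg (by simp [hpre])]
        rw [ih rest (c :: cur) acc (by simpa using Nat.lt_of_succ_lt_succ (by simpa using h))]
        simp only [pvSplitQ, if_neg hc]
        cases hs : pvSplitQ rest with
        | nil => exact absurd hs (pvSplitQ_ne_nil rest)
        | cons s ss => simp [pvMapFirst]

lemma pv_splitOn_quote (l : List Char) : PySem.Chars.splitOn l ['"'] = pvSplitQ l := by
  rw [PySem.Chars.splitOn, pv_go_eq (l.length + 1) l [] [] (Nat.lt_succ_self _)]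
  cases h : pvSplitQ l <;> simp [pvMapFirst]

-- processing of the segment list, bool = in-quote parity (proof-only reference)
def pvProc (mp : List Char) : List (List Char) → Bool → List String → List String
  | [], _, acc => acc
  | p :: ps, inq, acc => pvProc mp ps (!inq) (pvFinishB mp p inq acc)

lemma pv_filter_eq (l : List (List Char)) :
    l.filter (fun x => decide (0 < x.length)) = l.filter (fun x => !x.isEmpty) := by
  apply List.filter_congr
  intro x _
  cases x <;> simp

lemma pv_step_eq (mp : List Char) (p : List Char) (n : Nat) (acc : List String) :
    (if PySem.Chars.len p ≤ 0 then acc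
     else
       let q := PySem.Chars.replace p mp []
       if PySem.Int.mod ((n : Int)) 2 = 0 then
         acc ++ ((PySem.Chars.splitOn q ['/']).filter (fun x => decide (0 < PySem.Chars.len x))).map String.ofList
       else
         if 0 < PySem.Chars.len q then acc ++ [String.ofList q] else acc)
      = pvFinishB mp p (decide (n % 2 = 1)) acc := by
  by_cases hp : p = []
  · simp [pvFinishB, hp, PySem.Chars.len_eq]
  · have hlen : ¬ PySem.Chars.len p ≤ 0 := by
      simp [PySem.Chars.len_eq, hp]
    have hmod : PySem.Int.mod ((n : Int)) 2 = ((n % 2 : Nat) : Int) := by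
      exact_mod_cast PySem.Int.mod_natCast n 2
    simp only [hmod]
    rw [if_neg hlen]
    rcases Nat.mod_two_eq_zero_or_one n with h2 | h2
    · rw [if_pos (by simp [h2])]
      simp [pvFinishB, hp, h2, pv_filter_eq]
    · rw [if_neg (by simp [h2])]
      by_cases hq : PySem.Chars.replace p mp [] = []
      · simp [pvFinishB, hp, h2, hq, PySem.Chars.len_eq]
      · simp [pvFinishB, hp, h2, hq, PySem.Chars.len_eq, List.length_pos_iff_ne_nil]

lemma pv_foldA (mp : List Char) (parts : List (List Char)) (n : Nat) (acc : List String) :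
    (PySem.List.enumerate parts ((n : Int))).foldl (fun acc p =>
      if PySem.Chars.len p.2 ≤ 0 then acc
      else
        let q := PySem.Chars.replace p.2 mp []
        if PySem.Int.mod p.1 2 = 0 then
          acc ++ ((PySem.Chars.splitOn q ['/']).filter (fun x => decide (0 < PySem.Chars.len x))).map String.ofList
        else
          if 0 < PySem.Chars.len q then acc ++ [String.ofList q] else acc) acc
      = pvProc mp parts (decide (n % 2 = 1)) acc := by
  induction parts generalizing n acc with
  | nil => simp [PySem.List.enumerate_nil, pvProc]
  | cons p ps ih =>
    rw [PySem.List.enumerate_cons, List.foldl_cons]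
    have hcast : ((n : Int)) + 1 = (((n + 1 : Nat)) : Int) := by push_cast; ring
    rw [hcast, ih (n + 1)]
    rw [pvProc, pv_step_eq]
    congr 1
    rcases Nat.mod_two_eq_zero_or_one n with h2 | h2 <;>
      simp [Nat.add_mod, h2]

lemma pv_goB_eq (mp : List Char) (cs : List Char) (inq : Bool) (seg : List Char) (acc : List String) :
    pvGoB mp cs inq seg acc = pvProc mp (pvMapFirst (fun s => seg ++ s) (pvSplitQ cs)) inq acc := by
  induction cs generalizing inq seg acc with
  | nil => simp [pvGoB, pvSplitQ, pvMapFirst, pvProc]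
  | cons c rest ih =>
    by_cases hc : c = '"'
    · subst hc
      rw [pvGoB, if_pos rfl, ih]
      rw [pvMapFirst_id]
      simp [pvSplitQ, pvMapFirst, pvProc]
    · rw [pvGoB, if_neg hc, ih]
      simp only [pvSplitQ, if_neg hc]
      cases hs : pvSplitQ rest with
      | nil => exact absurd hs (pvSplitQ_ne_nil rest)
      | cons s ss => simp [pvMapFirst, pvProc]

-- ===== VERDICT (by name: the statement is the Claim_ definition above) =====
theorem clean_state_path_spec : Claim_equal_clean_state_path := by
  intro method_path request_path _
  unfold Spec_clean_state_path
  simp only [clean_state_path, clean_state_path_alt]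
  rw [pv_splitOn_quote, pv_goB_eq, pvMapFirst_id]
  simpa using pv_foldA method_path.toList (pvSplitQ request_path.toList) 0 []
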